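-- pv_equiv track=rewrite | github.com/weechat/scripts | python/cmd_help.py | get_command_arguments
-- ===== SOURCE A (Python) =====
-- def get_command_arguments(input_args, cmd_args):
--     """Get command arguments according to command arguments given in input."""
--     partial = ''
--     input_firstarg = input_args.split(' ', 1)[0].lower()
--     items = cmd_args.split('||')
--     for item in items:
--         item = item.strip()
--         firstword = item.split(' ')[0]
--         items2 = firstword.split('|')
--         for item2 in items2:
--             item2 = item2.strip().lower()
--             if item2 == input_firstarg:
--                 return item
--             if not partial and item2.startswith(input_firstarg):
--                 partial = item
--     if partial:
--         return partial
--     return cmd_args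
-- ===== SOURCE B (Python) =====
-- def get_command_arguments(input_args, cmd_args):
--     """Get command arguments according to command arguments given in input."""
--     first = input_args.split(' ', 1)[0].lower()
--     items = [i.strip() for i in cmd_args.split('||')]
--     alternatives = [[a.strip().lower() for a in it.split(' ')[0].split('|')]
--                     for it in items]
--     # pass 1: exact match wins, first occurrence
--     for it, alts in zip(items, alternatives):
--         if first in alts:
--             return it
--     # pass 2: prefix match, first occurrence
--     for it, alts in zip(items, alternatives):
--         if any(a.startswith(first) for a in alts):
--             return it
--     return cmd_args
-- ===== Notes on version B (the rewrite author's own statement) =====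
-- stated objective: simpler
-- what changed: A's single loop interleaving exact-match returns with a mutable `partial` accumulator is replaced by two separate find-first passes over the precomputed stripped items and their normalized alternatives: one for exact matches, then one for prefix matches, falling back to the unstripped cmd_args.
import Mathlib
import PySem

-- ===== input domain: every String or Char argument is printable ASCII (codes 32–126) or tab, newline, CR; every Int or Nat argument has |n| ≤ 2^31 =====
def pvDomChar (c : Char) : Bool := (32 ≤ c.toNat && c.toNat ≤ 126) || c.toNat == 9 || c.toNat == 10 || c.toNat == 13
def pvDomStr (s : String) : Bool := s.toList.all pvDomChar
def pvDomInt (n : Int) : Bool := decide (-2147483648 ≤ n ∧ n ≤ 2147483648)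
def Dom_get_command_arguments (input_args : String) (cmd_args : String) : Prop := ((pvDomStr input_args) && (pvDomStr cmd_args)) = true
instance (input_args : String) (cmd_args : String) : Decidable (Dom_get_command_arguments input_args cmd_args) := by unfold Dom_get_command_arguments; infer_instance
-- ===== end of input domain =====

-- B replaces A's single interleaved loop with a mutable `partial` accumulator by two separate
-- find-first passes over the stripped items (exact match pass, then prefix match pass): simpler decomposition.


-- ===== PORT A =====
-- s.split(sep) for a nonempty sep: split? is none only for sep = "", so .getD [] is exact here
def pvSplit (s sep : String) : List String := (PySem.Str.split? s sep).getD []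

-- input_args.split(' ', 1)[0].lower() — split always yields a nonempty list, so .headD "" is exact
def pvFirstArg (input_args : String) : String :=
  PySem.Str.lower (((PySem.Str.splitMax? input_args " " 1).getD []).headD "")

-- inner `for item2 in items2` loop of A; fst = some r means `return r`, snd is `partial`
def pvInnerA (first : String) (item : String) (items2 : List String) (partial_ : String) :
    Option String × String :=
  match items2 with
  | [] => (none, partial_)
  | a :: rest =>
    let item2 := PySem.Str.lower (PySem.Str.strip a)
    if item2 == first then (some item, partial_)
    else if partial_ == "" && PySem.Str.startswith item2 first then pvInnerA first item rest item
    else pvInnerA first item rest partial_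

-- outer `for item in items` loop of A, followed by the final `if partial:` return
def pvOuterA (first : String) (cmd_args : String) (items : List String) (partial_ : String) :
    String :=
  match items with
  | [] => if partial_ == "" then cmd_args else partial_
  | item0 :: rest =>
    let item := PySem.Str.strip item0
    let firstword := (pvSplit item " ").headD ""   -- item.split(' ')[0]; list nonempty, headD exact
    let items2 := pvSplit firstword "|"
    match pvInnerA first item items2 partial_ with
    | (some r, _) => r
    | (none, p') => pvOuterA first cmd_args rest p'

def get_command_arguments (input_args : String) (cmd_args : String) : String :=
  pvOuterA (pvFirstArg input_args) cmd_args (pvSplit cmd_args "||") ""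

-- ===== PORT B =====
-- normalized alternatives of one stripped item: [a.strip().lower() for a in it.split(' ')[0].split('|')]
def pvAltsOf (it : String) : List String :=
  (pvSplit ((pvSplit it " ").headD "") "|").map (fun a => PySem.Str.lower (PySem.Str.strip a))

-- pass-1 predicate: `first in alts`
def pvExact (first it : String) : Bool := (pvAltsOf it).contains first

-- pass-2 predicate: `any(a.startswith(first) for a in alts)`
def pvPref (first it : String) : Bool :=
  (pvAltsOf it).any (fun a => PySem.Str.startswith a first)

def get_command_arguments_alt (input_args : String) (cmd_args : String) : String :=
  let first := pvFirstArg input_args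
  let items := (pvSplit cmd_args "||").map PySem.Str.strip
  match items.find? (pvExact first) with
  | some it => it
  | none =>
    match items.find? (pvPref first) with
    | some it => it
    | none => cmd_args

-- ===== PRECONDITION & SPEC =====
def Spec_get_command_arguments (input_args : String) (cmd_args : String) (out : String) : Prop := out = get_command_arguments_alt input_args cmd_args
instance (input_args : String) (cmd_args : String) (out : String) : Decidable (Spec_get_command_arguments input_args cmd_args out) := by unfold Spec_get_command_arguments; infer_instance

-- ===== CLAIM (what is proved, stated in full; the proofs are below) =====
def Claim_equal_get_command_arguments : Prop := ∀ (input_args : String) (cmd_args : String), Dom_get_command_arguments input_args cmd_args → Spec_get_command_arguments input_args cmd_args (get_command_arguments input_args cmd_args)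

-- ===== LEMMAS AND PROOFS =====

-- B's membership test written as the `any` over the raw split that A's inner loop performs
lemma pvExact_eq_any (first it : String) :
    pvExact first it =
      (pvSplit ((pvSplit it " ").headD "") "|").any
        (fun a => PySem.Str.lower (PySem.Str.strip a) == first) := by
  rw [pvExact, pvAltsOf, ← List.any_beq', List.any_map]
  rfl

lemma pvPref_eq_any (first it : String) :
    pvPref first it =
      (pvSplit ((pvSplit it " ").headD "") "|").any
        (fun a => PySem.Str.startswith (PySem.Str.lower (PySem.Str.strip a)) first) := by
  rw [pvPref, pvAltsOf, List.any_map]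
  rfl

-- if some normalized alternative equals `first`, A's inner loop returns the item
lemma pvInnerA_exact (first item : String) (l : List String) (p : String)
    (h : l.any (fun a => PySem.Str.lower (PySem.Str.strip a) == first) = true) :
    (pvInnerA first item l p).1 = some item := by
  induction l generalizing p with
  | nil => simp at h
  | cons a rest ih =>
    simp only [List.any_cons, Bool.or_eq_true] at h
    simp only [pvInnerA]
    by_cases he : (PySem.Str.lower (PySem.Str.strip a) == first) = true
    · simp [he]
    · have hr : rest.any (fun a => PySem.Str.lower (PySem.Str.strip a) == first) = true := by
        rcases h with h | h
        · exact absurd h he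
        · exact h
      rw [if_neg he]
      split
      · exact ih item hr
      · exact ih p hr

-- if no alternative is exact, A's inner loop falls through; `partial` is replaced by the item
-- exactly when it was empty and some alternative is a prefix match
lemma pvInnerA_noexact (first item : String) (l : List String) (p : String)
    (h : l.any (fun a => PySem.Str.lower (PySem.Str.strip a) == first) = false) :
    pvInnerA first item l p =
      (none, if p == "" && l.any (fun a => PySem.Str.startswith (PySem.Str.lower (PySem.Str.strip a)) first)
             then item else p) := by
  induction l generalizing p with
  | nil => simp [pvInnerA]
  | cons a rest ih =>
    simp only [List.any_cons, Bool.or_eq_false_iff] at h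
    obtain ⟨ha, hr⟩ := h
    simp only [pvInnerA, List.any_cons]
    rw [if_neg (by simp [ha])]
    by_cases hp1 : (p == "") = true
    · by_cases hs : PySem.Str.startswith (PySem.Str.lower (PySem.Str.strip a)) first = true
      · rw [if_pos (by rw [hp1, hs]; rfl), ih item hr]
        simp only [hp1, hs, Bool.true_and, Bool.true_or, if_true, ite_self]
      · have hsf : PySem.Str.startswith (PySem.Str.lower (PySem.Str.strip a)) first = false :=
          Bool.of_not_eq_true hs
        rw [if_neg (by rw [hsf]; simp), ih p hr]
        simp only [hsf, Bool.false_or]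
    · have hpf : (p == "") = false := Bool.of_not_eq_true hp1
      rw [if_neg (by rw [hpf]; simp), ih p hr]
      simp only [hpf, Bool.false_and, Bool.false_eq_true, if_false]

-- a prefix match that is not exact forces a nonempty alternative, hence a nonempty item
lemma pvPref_ne_empty (first it : String) (hx : pvExact first it = false)
    (hp : pvPref first it = true) : (it == "") = false := by
  cases hb : (it == "") with
  | false => rfl
  | true =>
    have h2 : it = "" := by simpa using hb
    subst h2
    have halts : pvAltsOf "" = [""] := by rfl
    rw [pvExact, halts] at hx
    rw [pvPref, halts] at hp
    simp only [List.any_cons, List.any_nil, Bool.or_false] at hp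
    simp only [PySem.Str.startswith_eq] at hp
    have h3 : first.toList = [] := by simpa using (PySem.Chars.startswith_iff _ _).mp hp
    have h4 : first = "" := String.toList_eq_nil_iff.mp h3
    subst h4
    exact absurd hx (by decide)

-- the two reduction shapes of one outer-loop step
lemma pvOuterA_cons_some (first cmd it0 : String) (rest : List String) (p r s : String)
    (h : pvInnerA first (PySem.Str.strip it0)
          (pvSplit ((pvSplit (PySem.Str.strip it0) " ").headD "") "|") p = (some r, s)) :
    pvOuterA first cmd (it0 :: rest) p = r := by
  rw [pvOuterA, h]

lemma pvOuterA_cons_none (first cmd it0 : String) (rest : List String) (p P : String)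
    (h : pvInnerA first (PySem.Str.strip it0)
          (pvSplit ((pvSplit (PySem.Str.strip it0) " ").headD "") "|") p = (none, P)) :
    pvOuterA first cmd (it0 :: rest) p = pvOuterA first cmd rest P := by
  rw [pvOuterA, h]

-- main invariant: A's outer loop equals B's two find-first passes, for any accumulator value
lemma pvOuterA_eq (first cmd : String) (items : List String) : ∀ (p : String),
    pvOuterA first cmd items p =
      match (items.map PySem.Str.strip).find? (pvExact first) with
      | some it => it
      | none =>
        if p == "" then
          match (items.map PySem.Str.strip).find? (pvPref first) with
          | some it => it
          | none => cmd
        else p := by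
  induction items with
  | nil =>
    intro p
    simp only [List.map_nil, List.find?_nil, pvOuterA]
  | cons it0 rest ih =>
    intro p
    rw [List.map_cons]
    by_cases hx : pvExact first (PySem.Str.strip it0) = true
    · have hany := (pvExact_eq_any first (PySem.Str.strip it0)).symm.trans hx
      have hfst := pvInnerA_exact first (PySem.Str.strip it0)
        (pvSplit ((pvSplit (PySem.Str.strip it0) " ").headD "") "|") p hany
      rcases hI : pvInnerA first (PySem.Str.strip it0)
          (pvSplit ((pvSplit (PySem.Str.strip it0) " ").headD "") "|") p with ⟨f, s⟩
      rw [hI] at hfst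
      have hf : f = some (PySem.Str.strip it0) := by simpa using hfst
      subst hf
      rw [pvOuterA_cons_some first cmd it0 rest p _ s hI, List.find?_cons_of_pos hx]
    · have hxf : pvExact first (PySem.Str.strip it0) = false := Bool.of_not_eq_true hx
      have hany := (pvExact_eq_any first (PySem.Str.strip it0)).symm.trans hxf
      rw [pvOuterA_cons_none first cmd it0 rest p _
            (pvInnerA_noexact first (PySem.Str.strip it0) _ p hany),
          ih, List.find?_cons_of_neg hx]
      rcases hfind : List.find? (pvExact first) (rest.map PySem.Str.strip) with _ | r
      · by_cases hp : (p == "") = true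
        · by_cases hpr : pvPref first (PySem.Str.strip it0) = true
          · have hne := pvPref_ne_empty first (PySem.Str.strip it0) hxf hpr
            rw [List.find?_cons_of_pos hpr]
            simp only [← pvPref_eq_any, hp, hpr, Bool.true_and, if_true, hne,
              Bool.false_eq_true, if_false]
          · have hprf : pvPref first (PySem.Str.strip it0) = false := Bool.of_not_eq_true hpr
            rw [List.find?_cons_of_neg hpr]
            simp only [← pvPref_eq_any, hp, hprf, Bool.true_and, Bool.false_eq_true, if_false,
              if_true]
        · have hpf : (p == "") = false := Bool.of_not_eq_true hp
          simp only [← pvPref_eq_any, hpf, Bool.false_and, Bool.false_eq_true, if_false]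
      · rfl

-- ===== VERDICT (by name: the statement is the Claim_ definition above) =====
theorem get_command_arguments_spec : Claim_equal_get_command_arguments := by
  intro input_args cmd_args _
  unfold Spec_get_command_arguments get_command_arguments get_command_arguments_alt
  rw [pvOuterA_eq]
  rfl
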